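-- pv_equiv track=rewrite | github.com/vodinhhung/Algorithm_practicing | code_force/1343C/solution.py | solution
-- ===== SOURCE A (Python) =====
-- from heapq import heapify, heappop, heappush
--
-- def solution(ar):
--     first, second, result = 0, 0, 0
--     while second < len(ar):
--         heap = []
--         heapify(heap)
--         heappush(heap, -1 * ar[first])
--         while second < len(ar) and ar[first]*ar[second] > 0:
--             heappush(heap, -1 * ar[second])
--             second += 1
--         result += -1 * heappop(heap)
--         first = second
--
--     return result
-- ===== SOURCE B (Python) =====
-- def solution(ar):
--     result = 0
--     prev = None
--     best = 0
--     for x in ar: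
--         if prev is not None and prev * x > 0:
--             if x > best:
--                 best = x
--         else:
--             result += best
--             best = x
--         prev = x
--     if prev is not None:
--         result += best
--     return result
-- ===== Notes on version B (the rewrite author's own statement) =====
-- stated objective: faster
-- what changed: B replaces A's per-run heap (heappush every run element, then pop the maximum) by a single linear pass that keeps the running maximum of the current same-sign run and adds it when the sign flips; Pre_ excludes lists containing 0, on which A's inner guard ar[first]*ar[second]>0 never advances and A loops forever.
import Mathlib
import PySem

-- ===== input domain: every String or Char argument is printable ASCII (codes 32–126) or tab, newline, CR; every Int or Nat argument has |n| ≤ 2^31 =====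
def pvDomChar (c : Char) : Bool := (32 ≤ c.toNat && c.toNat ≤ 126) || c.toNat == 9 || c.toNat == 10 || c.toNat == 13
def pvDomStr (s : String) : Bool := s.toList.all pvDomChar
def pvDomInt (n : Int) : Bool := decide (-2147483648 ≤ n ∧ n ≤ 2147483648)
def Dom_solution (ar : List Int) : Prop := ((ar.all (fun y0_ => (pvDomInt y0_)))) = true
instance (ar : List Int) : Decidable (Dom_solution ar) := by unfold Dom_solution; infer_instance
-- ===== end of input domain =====

-- B replaces A's per-run heap construction (heappush every element, pop the max) by a single
-- linear pass keeping the running maximum of the current same-sign run; objective: faster.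

-- ===== PORT A =====
-- the Python heap is used as a bag popped once, so it is modelled as the list of pushed
-- values; heappush = append, heappop = smallest element (exact value-wise)
def popMin (l : List Int) : Int :=
  match l with
  | [] => 0            -- unreachable: A always pushes before popping
  | x :: xs => xs.foldl min x

-- inner `while second < len(ar) and ar[first]*ar[second] > 0`
def solInner (ar : List Int) (first second : Nat) (heap : List Int) : List Int × Nat :=
  if _h : second < ar.length ∧ (ar.getD first 0) * (ar.getD second 0) > 0 then
    solInner ar first (second + 1) (heap ++ [(-1) * ar.getD second 0])
  else (heap, second)
termination_by ar.length - second
decreasing_by omega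

-- outer `while second < len(ar)`; the fuel only caps the iteration count: on lists without
-- zeros (Pre_) each outer iteration advances `second`, so `ar.length` fuel is never exhausted
def solOuter (ar : List Int) (fuel : Nat) (first second : Nat) (result : Int) : Int :=
  match fuel with
  | 0 => result
  | fuel + 1 =>
    if second < ar.length then
      let heap := [(-1) * ar.getD first 0]
      let p := solInner ar first second heap
      solOuter ar fuel p.2 p.2 (result + (-1) * popMin p.1)
    else result

def solution (ar : List Int) : Int := solOuter ar ar.length 0 0 0

-- ===== PORT B =====
-- state of B's single pass: (result so far, previous element, max of the current run)
def altStep (st : Int × Option Int × Int) (x : Int) : Int × Option Int × Int :=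
  match st with
  | (result, some p, best) =>
    if p * x > 0 then (result, some x, if x > best then x else best)
    else (result + best, some x, x)
  | (result, none, _) => (result + 0, some x, x)

-- the trailing `if prev is not None: result += best`
def altFinish (st : Int × Option Int × Int) : Int :=
  match st with
  | (result, some _, best) => result + best
  | (result, none, _) => result

def solution_alt (ar : List Int) : Int := altFinish (ar.foldl altStep (0, none, 0))

-- ===== PRECONDITION & SPEC =====
-- Pre_ excludes lists containing 0: there A's inner guard `ar[first]*ar[second] > 0` never
-- advances `second` past the zero, so the Python A loops forever (returns nothing).
def Pre_solution (ar : List Int) : Prop := ¬ (0 : Int) ∈ ar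
instance (ar : List Int) : Decidable (Pre_solution ar) := by unfold Pre_solution; infer_instance

def pvWitness_solution : List Int := [5, 2, -1, -3, 4]

def Spec_solution (ar : List Int) (out : Int) : Prop := out = solution_alt ar
instance (ar : List Int) (out : Int) : Decidable (Spec_solution ar out) := by unfold Spec_solution; infer_instance

-- ===== CLAIM (what is proved, stated in full; the proofs are below) =====
def Claim_equal_solution : Prop := ∀ (ar : List Int), Dom_solution ar → Pre_solution ar → Spec_solution ar (solution ar)

-- ===== LEMMAS AND PROOFS =====

-- reference semantics: sum over same-sign runs of the run maximum
def runSum (p b : Int) : List Int → Int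
  | [] => b
  | x :: xs => if p * x > 0 then runSum x (max b x) xs else b + runSum x x xs

def tailSum : List Int → Int
  | [] => 0
  | x :: xs => runSum x x xs

-- sign transitivity for nonzero ints
theorem sign_trans {a p x : Int} (h1 : a * p > 0) (h2 : a * x > 0) : p * x > 0 := by
  rcases mul_pos_iff.mp h1 with ⟨ha, hp⟩ | ⟨ha, hp⟩ <;>
    rcases mul_pos_iff.mp h2 with ⟨ha', hx⟩ | ⟨ha', hx⟩ <;>
      first
        | exact mul_pos hp hx
        | exact mul_pos_of_neg_of_neg hp hx
        | omega

theorem sign_trans_not {a p x : Int} (h1 : a * p > 0) (h2 : ¬ a * x > 0) :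
    ¬ p * x > 0 := by
  intro h3
  exact h2 (sign_trans (mul_pos_iff.mp h1 |> fun h => by
    rcases h with ⟨ha, hp⟩ | ⟨ha, hp⟩
    · exact mul_pos hp ha
    · exact mul_pos_of_neg_of_neg hp ha) h3)

-- B's fold computes runSum
theorem alt_fold (l : List Int) : ∀ (r p b : Int),
    altFinish (l.foldl altStep (r, some p, b)) = r + runSum p b l := by
  induction l with
  | nil => intro r p b; simp [altFinish, runSum]
  | cons x xs ih =>
    intro r p b
    rw [List.foldl_cons]
    by_cases h : p * x > 0
    · have hs : altStep (r, some p, b) x = (r, some x, max b x) := by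
        have hm : (if x > b then x else b) = max b x := by
          rcases le_total x b with h' | h' <;> simp [max_def] <;> omega
        simp [altStep, h, hm]
      rw [hs, ih, runSum, if_pos h]
    · have hs : altStep (r, some p, b) x = (r + b, some x, x) := by
        simp [altStep, h]
      rw [hs, ih, runSum, if_neg h]; ring

theorem alt_eq_tailSum (ar : List Int) : solution_alt ar = tailSum ar := by
  cases ar with
  | nil => rfl
  | cons x xs =>
    have hs : altStep (0, none, 0) x = (0, some x, x) := by simp [altStep]
    simp only [solution_alt, List.foldl_cons, tailSum, hs]
    simpa using alt_fold xs 0 x x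

-- the inner loop collects (negated) the same-sign prefix of the remaining list
theorem inner_eq (ar : List Int) (first : Nat) : ∀ second heap,
    solInner ar first second heap =
      (heap ++ ((ar.drop second).takeWhile
          (fun y => decide (ar.getD first 0 * y > 0))).map (fun y => (-1) * y),
       second + ((ar.drop second).takeWhile
          (fun y => decide (ar.getD first 0 * y > 0))).length) := by
  intro second
  induction hn : ar.length - second using Nat.strong_induction_on generalizing second with
  | _ n ih =>
    intro heap
    rw [solInner]
    by_cases hlt : second < ar.length
    · have hdrop : ar.drop second = ar[second] :: ar.drop (second + 1) :=
        List.drop_eq_getElem_cons hlt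
      have hg : ar.getD second 0 = ar[second] := List.getD_eq_getElem ar 0 hlt
      by_cases hc : ar.getD first 0 * ar.getD second 0 > 0
      · rw [dif_pos ⟨hlt, hc⟩]
        rw [ih (ar.length - (second + 1)) (by omega) (second + 1) rfl]
        rw [hdrop]
        rw [List.takeWhile_cons_of_pos
          (by simp only [decide_eq_true_eq]; rw [← hg]; exact hc)]
        rw [hg]
        refine Prod.ext ?_ ?_
        · simp only [List.map_cons, List.append_assoc, List.singleton_append]
        · simp only [List.length_cons]; omega
      · rw [dif_neg (by tauto)]
        rw [hdrop, List.takeWhile_cons_of_neg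
          (by simp only [decide_eq_true_eq]; rw [← hg]; exact hc)]
        simp
    · rw [dif_neg (by omega)]
      rw [List.drop_eq_nil_of_le (by omega)]
      simp

-- popping the min of the negated values is the negated max
theorem popmin_neg (t : List Int) : ∀ a : Int,
    popMin (((-1) * a) :: t.map (fun y => (-1) * y)) = (-1) * t.foldl max a := by
  induction t with
  | nil => intro a; simp [popMin]
  | cons x xs ih =>
    intro a
    have h1 := ih (max a x)
    simp only [popMin, List.map_cons, List.foldl_cons] at *
    have : min ((-1) * a) ((-1) * x) = (-1) * max a x := by
      rcases le_total a x with h | h <;> simp [max_def, min_def] <;> omega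
    rw [show (xs.map (fun y => (-1)*y)).foldl min (min ((-1)*a) ((-1)*x))
          = (xs.map (fun y => (-1)*y)).foldl min ((-1) * max a x) by rw [this]]
    exact h1

-- runSum splits at the first sign change
theorem runSum_split (a : Int) : ∀ (rest : List Int) (p b : Int),
    (0 : Int) ∉ rest → a * p > 0 →
    runSum p b rest =
      (rest.takeWhile (fun y => decide (a * y > 0))).foldl max b +
        tailSum (rest.dropWhile (fun y => decide (a * y > 0))) := by
  intro rest
  induction rest with
  | nil => intro p b _ _; simp [runSum, tailSum]
  | cons x xs ih =>
    intro p b h0 hap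
    by_cases hc : a * x > 0
    · have hpx : p * x > 0 := sign_trans hap hc
      rw [List.takeWhile_cons_of_pos (by simp [hc]), List.dropWhile_cons_of_pos (by simp [hc])]
      simp only [runSum, if_pos hpx, List.foldl_cons]
      exact ih x (max b x) (by simp at h0 ⊢; tauto) hc
    · have hpx : ¬ p * x > 0 := sign_trans_not hap hc
      rw [List.takeWhile_cons_of_neg (by simp [hc]), List.dropWhile_cons_of_neg (by simp [hc])]
      simp only [runSum, if_neg hpx, List.foldl_nil, tailSum]

theorem dropWhile_eq_drop_len (p : Int → Bool) : ∀ l : List Int,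
    l.dropWhile p = l.drop (l.takeWhile p).length := by
  intro l
  induction l with
  | nil => rfl
  | cons x xs ih =>
    by_cases h : p x <;> simp [h, ih]

theorem outer_eq (ar : List Int) (h0 : (0 : Int) ∉ ar) : ∀ fuel second (r : Int),
    second ≤ ar.length → ar.length - second ≤ fuel →
    solOuter ar fuel second second r = r + tailSum (ar.drop second) := by
  intro fuel
  induction fuel with
  | zero =>
    intro second r hle hf
    have : second = ar.length := by omega
    simp [solOuter, this, List.drop_length, tailSum]
  | succ fuel ih =>
    intro second r hle hf
    rw [solOuter]
    by_cases hlt : second < ar.length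
    · rw [if_pos hlt]
      have hg : ar.getD second 0 = ar[second] := List.getD_eq_getElem ar 0 hlt
      set a := ar[second] with ha
      have haz : a ≠ 0 := fun h => h0 (h ▸ List.getElem_mem hlt)
      have haa : a * a > 0 := mul_pos_iff.mpr (by rcases lt_trichotomy a 0 with h|h|h <;> [right; omega; left] <;> exact ⟨h, h⟩)
      have hdrop : ar.drop second = a :: ar.drop (second + 1) := List.drop_eq_getElem_cons hlt
      simp only [inner_eq]
      set t2 := (ar.drop (second + 1)).takeWhile (fun y => decide (a * y > 0)) with ht2
      have htw : (ar.drop second).takeWhile (fun y => decide (ar.getD second 0 * y > 0))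
          = a :: t2 := by
        rw [hg, hdrop, List.takeWhile_cons_of_pos (by simp [haa])]
      rw [htw]
      simp only [List.singleton_append, List.length_cons]
      rw [popmin_neg]
      have hlen2 : t2.length ≤ ar.length - (second + 1) := by
        have := (List.takeWhile_prefix (l := ar.drop (second + 1))
          (p := fun y => decide (a * y > 0))).length_le
        rw [← ht2] at this
        simp only [List.length_drop] at this
        omega
      have hfold : List.foldl max (ar.getD second 0) (a :: t2) = List.foldl max a t2 := by
        rw [hg]; simp [List.foldl_cons]
      rw [hfold]
      have hstep := ih (second + (t2.length + 1)) (r + (-1) * ((-1) * List.foldl max a t2))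
        (by omega) (by omega)
      rw [hstep]
      have hdw : ar.drop (second + (t2.length + 1))
          = (ar.drop (second + 1)).dropWhile (fun y => decide (a * y > 0)) := by
        rw [dropWhile_eq_drop_len, ← ht2, List.drop_drop]
        congr 1; omega
      rw [hdw, hdrop]
      simp only [tailSum]
      rw [runSum_split a (ar.drop (second + 1)) a a
        (fun hm => h0 (List.mem_of_mem_drop hm)) haa, ← ht2]
      have : List.foldl max a t2 = List.foldl max (max a a) t2 := by rw [max_self]
      rw [this]
      simp
      rw [add_assoc, tailSum.eq_def]
    · rw [if_neg hlt]
      have : second = ar.length := by omega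
      simp [this, List.drop_length, tailSum]

-- ===== VERDICT (by name: the statement is the Claim_ definition above) =====
theorem solution_spec : Claim_equal_solution := by
  intro ar _ hpre
  unfold Spec_solution solution
  rw [alt_eq_tailSum]
  have := outer_eq ar hpre ar.length 0 0 (by omega) (by omega)
  simpa using this
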